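-- pv_equiv track=rewrite | github.com/oneshan/foobar | re_id/solution.py | answer
-- ===== SOURCE A (Python) =====
-- def answer(n):
--     table = [True] * 20220
--     table[0] = table[1] = False
--     for i in range(2, 20220):
--         if table[i]:
--             for j in range(i + i, 20220, i):
--                 table[j] = False
--     prime_str = "".join([str(i) for i in range(1, 20220) if table[i]])
--     return prime_str[n: n + 5]
-- ===== SOURCE B (Python) =====
-- def answer(n):
--     parts = []
--     for i in range(2, 20220):
--         is_prime = True
--         d = 2
--         while d * d <= i:
--             if i % d == 0:
--                 is_prime = False
--                 break
--             d += 1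
--         if is_prime:
--             parts.append(str(i))
--     return "".join(parts)[n: n + 5]
-- ===== Notes on version B (the rewrite author's own statement) =====
-- stated objective: alternative
-- what changed: Replaces the boolean sieve table (and its post-hoc filter over range(1, 20220)) with direct per-number trial division up to the square root, collecting each prime's digits in one pass; no table is ever built.
import Mathlib
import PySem

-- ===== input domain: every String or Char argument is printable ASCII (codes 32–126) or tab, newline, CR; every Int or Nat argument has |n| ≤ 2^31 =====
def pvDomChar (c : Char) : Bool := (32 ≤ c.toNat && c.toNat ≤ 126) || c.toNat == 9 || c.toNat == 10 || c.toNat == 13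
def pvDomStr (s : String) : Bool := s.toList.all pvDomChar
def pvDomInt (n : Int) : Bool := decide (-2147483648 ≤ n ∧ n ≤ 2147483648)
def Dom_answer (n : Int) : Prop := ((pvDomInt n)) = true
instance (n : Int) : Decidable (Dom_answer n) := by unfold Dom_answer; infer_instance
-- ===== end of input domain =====

-- B replaces A's boolean sieve table with per-number trial division up to the square root
-- (a different algorithm of similar cost; not claimed faster).


-- ===== PORT A =====
-- table = [True] * 20220; table[0] = table[1] = False
def answerInit : List Bool :=
  PySem.List.pySetD (PySem.List.pySetD (List.replicate 20220 true) 0 false) 1 false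

-- the body of the outer 'for i in range(2, 20220)' loop
def answerStep (table : List Bool) (i : Int) : List Bool :=
  if PySem.List.pyGetD table i false then
    (PySem.List.pyRange (i + i) 20220 i).foldl
      (fun t j => PySem.List.pySetD t j false) table
  else table

def answerTable : List Bool :=
  (PySem.List.pyRange 2 20220 1).foldl answerStep answerInit

-- prime_str = "".join([str(i) for i in range(1, 20220) if table[i]])
def answerPrimeStr : String :=
  PySem.Str.join ""
    (((PySem.List.pyRange 1 20220 1).filter
        (fun i => PySem.List.pyGetD answerTable i false)).map PySem.Int.toStr)

def answer (n : Int) : String :=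
  PySem.Str.slice answerPrimeStr (some n) (some (n + 5))

-- ===== PORT B =====
-- the 'while d * d <= i' trial-division loop of Source B; returns the final is_prime flag
def answerTrial (i d : Int) : Bool :=
  if d * d ≤ i then
    (if PySem.Int.mod i d = 0 then false else answerTrial i (d + 1))
  else true
termination_by (i + 1 - d).toNat
decreasing_by
  have h : d * d ≤ i := by assumption
  have : d ≤ i := by nlinarith [sq_nonneg d, sq_nonneg (d - 1)]
  omega

def answer_alt (n : Int) : String :=
  PySem.Str.slice
    (PySem.Str.join ""
      ((PySem.List.pyRange 2 20220 1).foldl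
        (fun parts i => if answerTrial i 2 then parts ++ [PySem.Int.toStr i] else parts) []))
    (some n) (some (n + 5))

-- ===== PRECONDITION & SPEC =====
def Spec_answer (n : Int) (out : String) : Prop := out = answer_alt n
instance (n : Int) (out : String) : Decidable (Spec_answer n out) := by unfold Spec_answer; infer_instance

-- ===== CLAIM (what is proved, stated in full; the proofs are below) =====
def Claim_equal_answer : Prop := ∀ (n : Int), Dom_answer n → Spec_answer n (answer n)

-- ===== LEMMAS AND PROOFS =====

-- "2 ≤ k and no prime p < m properly divides k": the sieve-table invariant after the
-- outer loop has processed i = 2 .. m-1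
def sieveP (m k : Nat) : Prop := 2 ≤ k ∧ ∀ p : Nat, p < m → Nat.Prime p → ¬(p ∣ k ∧ p < k)

lemma sieveP_char {m k : Nat} (h2 : 2 ≤ k) (hk : k ≤ m) : sieveP m k ↔ Nat.Prime k := by
  constructor
  · rintro ⟨-, hall⟩
    by_contra hnp
    have hpf : Nat.Prime k.minFac := Nat.minFac_prime (by omega)
    have hdvd : k.minFac ∣ k := Nat.minFac_dvd k
    have hne : k.minFac ≠ k := fun h => hnp (Nat.prime_def_minFac.mpr ⟨h2, h⟩)
    have hlt : k.minFac < k := lt_of_le_of_ne (Nat.le_of_dvd (by omega) hdvd) hne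
    exact hall k.minFac (by omega) hpf ⟨hdvd, hlt⟩
  · intro hp
    refine ⟨h2, fun p _ hpp ⟨hdvd, hlt⟩ => ?_⟩
    rcases hp.eq_one_or_self_of_dvd p hdvd with h | h
    · exact absurd h (by have := hpp.two_le; omega)
    · omega

-- the inner marking loop: every listed (nonnegative) index is set to False, the rest unchanged
lemma foldl_clear (js : List Int) (hjs : ∀ j ∈ js, 0 ≤ j) : ∀ (table : List Bool),
    (js.foldl (fun t j => PySem.List.pySetD t j false) table).length = table.length ∧
    ∀ k : Nat, k < table.length →
      (js.foldl (fun t j => PySem.List.pySetD t j false) table).getD k false =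
        if (k : Int) ∈ js then false else table.getD k false := by
  induction js with
  | nil => intro table; simp
  | cons j js ih =>
    intro table
    have hj : 0 ≤ j := hjs j (by simp)
    have hjs' : ∀ x ∈ js, 0 ≤ x := fun x hx => hjs x (by simp [hx])
    simp only [List.foldl_cons]
    rw [PySem.List.pySetD_of_nonneg table false hj]
    obtain ⟨hlen, hget⟩ := ih hjs' (table.set j.toNat false)
    refine ⟨by simpa using hlen, fun k hk => ?_⟩
    rw [hget k (by simpa using hk)]
    by_cases hmem : (k : Int) ∈ js
    · simp [hmem]
    · simp only [if_false, List.mem_cons, hmem, or_false]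
      rw [List.getD_eq_getElem?_getD, List.getD_eq_getElem?_getD, List.getElem?_set]
      by_cases hkj : (k : Int) = j
      · have : j.toNat = k := by omega
        simp [this, hk, hkj]
      · have : j.toNat ≠ k := by omega
        simp [this, hkj]

lemma dvd_two_mul_le {m k : Nat} (h2 : 2 ≤ m) (hdvd : m ∣ k) : m < k ↔ m + m ≤ k := by
  constructor
  · intro hlt
    obtain ⟨c, rfl⟩ := hdvd
    rcases c with _ | _ | c
    · omega
    · omega
    · nlinarith
  · omega

lemma sieve_inv (t : Nat) (ht : t ≤ 20218) :
    ((PySem.List.pyRange 2 (2 + (t : Int)) 1).foldl answerStep answerInit).length = 20220 ∧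
    ∀ k : Nat, k < 20220 →
      (((PySem.List.pyRange 2 (2 + (t : Int)) 1).foldl answerStep answerInit).getD k false = true
        ↔ sieveP (2 + t) k) := by
  induction t with
  | zero =>
    rw [show ((2:Int) + (0:Nat)) = 2 by norm_num, PySem.List.pyRange_one_eq_nil le_rfl]
    simp only [List.foldl_nil]
    constructor
    · unfold answerInit
      rw [PySem.List.length_pySetD, PySem.List.length_pySetD, List.length_replicate]
    · intro k hk
      have hchar : sieveP 2 k ↔ 2 ≤ k := by
        refine ⟨fun h => h.1, fun h => ⟨h, fun p hp hpp _ => absurd hpp.two_le (by omega)⟩⟩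
      rw [hchar]
      unfold answerInit
      rw [PySem.List.pySetD_of_nonneg _ false (by norm_num),
          PySem.List.pySetD_of_nonneg _ false (by norm_num)]
      rw [List.getD_eq_getElem?_getD, List.getElem?_set, List.getElem?_set]
      rcases k with _ | _ | k
      · norm_num
      · norm_num
      · simp only [List.getElem?_replicate]
        have h0 : (Int.toNat 0) ≠ k + 1 + 1 := by omega
        have h1 : (Int.toNat 1) ≠ k + 1 + 1 := by omega
        simp only [h0, h1, if_false, hk, if_true, Option.getD_some]
        simp only [iff_true_intro (by omega : 2 ≤ k + 1 + 1)]
  | succ t ih =>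
    obtain ⟨hlen, hget⟩ := ih (by omega)
    set old := (PySem.List.pyRange 2 (2 + (t : Int)) 1).foldl answerStep answerInit with hold
    set m := 2 + t with hm
    have hcast : ((2:Int) + ((t:Nat)+1:Nat)) = (2 + (t:Int)) + 1 := by push_cast; ring
    rw [hcast, PySem.List.pyRange_one_succ_right (by omega), List.foldl_append]
    simp only [List.foldl_cons, List.foldl_nil, ← hold]
    have hmlt : m < 20220 := by omega
    -- value of table[m] read by this step of the outer loop
    have htm : (PySem.List.pyGetD old (2 + (t:Int)) false = true) ↔ Nat.Prime m := by
      have hmc0 : ((m : Nat) : Int) = 2 + (t : Int) := by push_cast [hm]; ring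
      rw [← hmc0, PySem.List.pyGetD_natCast]
      exact (hget m hmlt).trans (sieveP_char (by omega) le_rfl)
    unfold answerStep
    by_cases hprime : Nat.Prime m
    · rw [if_pos (htm.mpr hprime)]
      have hjs : ∀ j ∈ PySem.List.pyRange ((2 + (t:Int)) + (2 + (t:Int))) 20220 (2 + (t:Int)),
          0 ≤ j := by
        intro j hj
        rw [PySem.List.mem_pyRange_iff_of_pos (by omega)] at hj
        omega
      obtain ⟨hlen2, hget2⟩ := foldl_clear _ hjs old
      refine ⟨by rw [hlen2, hlen], fun k hk => ?_⟩
      rw [hget2 k (by omega)]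
      have hmemiff : ((k:Int) ∈ PySem.List.pyRange ((2 + (t:Int)) + (2 + (t:Int))) 20220 (2 + (t:Int)))
          ↔ (m ∣ k ∧ m + m ≤ k) := by
        rw [PySem.List.mem_pyRange_iff_of_pos (by omega)]
        have hmc : ((m : Nat) : Int) = 2 + (t : Int) := by push_cast [hm]; ring
        constructor
        · rintro ⟨hge, hlt2, hdvd⟩
          have hdvd2 : (2 + (t:Int)) ∣ (k:Int) := by
            have := dvd_add hdvd (Dvd.intro 2 (by ring) : (2 + (t:Int)) ∣ ((2 + (t:Int)) + (2 + (t:Int))))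
            simpa using this
          rw [← hmc] at hdvd2 hge
          refine ⟨by exact_mod_cast hdvd2, by exact_mod_cast (by push_cast at hge ⊢; omega : ((m:Int) + m ≤ k))⟩
        · rintro ⟨hdvd, hge⟩
          rw [← hmc]
          refine ⟨by exact_mod_cast hge, by omega, ?_⟩
          have : ((m:Int)) ∣ (k:Int) := by exact_mod_cast hdvd
          exact dvd_sub this (by exact Dvd.intro 2 (by ring))
      show _ ↔ sieveP (m + 1) k
      by_cases hmem : (k:Int) ∈ PySem.List.pyRange ((2 + (t:Int)) + (2 + (t:Int))) 20220 (2 + (t:Int))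
      · obtain ⟨hdvd, hge⟩ := hmemiff.mp hmem
        simp only [hmem, if_true, Bool.false_eq_true, false_iff]
        rintro ⟨h2, hall⟩
        exact hall m (by omega) hprime ⟨hdvd, by omega⟩
      · have hnot : ¬ (m ∣ k ∧ m + m ≤ k) := fun h => hmem (hmemiff.mpr h)
        simp only [hmem, if_false]
        rw [hget k hk]
        constructor
        · rintro ⟨h2, hall⟩
          refine ⟨h2, fun p hp hpp hpk => ?_⟩
          rcases Nat.lt_succ_iff_lt_or_eq.mp hp with h | h
          · exact hall p h hpp hpk
          · subst h
            exact hnot ⟨hpk.1, (dvd_two_mul_le (by omega) hpk.1).mp hpk.2⟩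
        · rintro ⟨h2, hall⟩
          exact ⟨h2, fun p hp hpp hpk => hall p (by omega) hpp hpk⟩
    · rw [if_neg (fun h => hprime (htm.mp h))]
      refine ⟨hlen, fun k hk => ?_⟩
      rw [hget k hk]
      constructor
      · rintro ⟨h2, hall⟩
        refine ⟨h2, fun p hp hpp hpk => ?_⟩
        rcases Nat.lt_succ_iff_lt_or_eq.mp (by omega : p < m + 1) with h | h
        · exact hall p (by omega) hpp hpk
        · subst h; exact absurd hpp hprime
      · rintro ⟨h2, hall⟩
        exact ⟨h2, fun p hp hpp hpk => hall p (by omega) hpp hpk⟩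

lemma answerTable_eq (i : Int) (h0 : 0 ≤ i) (hi : i < 20220) :
    (PySem.List.pyGetD answerTable i false = true) ↔ Nat.Prime i.toNat := by
  obtain ⟨hlen, hget⟩ := sieve_inv 20218 le_rfl
  have hcast : ((2:Int) + ((20218 : Nat) : Int)) = 20220 := by norm_num
  rw [hcast] at hlen hget
  have hik : i = ((i.toNat : Nat) : Int) := by omega
  rw [hik, PySem.List.pyGetD_natCast, Int.toNat_natCast]
  unfold answerTable
  rw [hget i.toNat (by omega)]
  rcases Nat.lt_or_ge i.toNat 2 with h | h
  · constructor
    · rintro ⟨h2, -⟩; omega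
    · intro hp; exact absurd hp.two_le (by omega)
  · exact sieveP_char h (by omega)

lemma answerTrial_iff (i : Int) : ∀ d : Int, 2 ≤ d →
    (answerTrial i d = true ↔ ∀ e : Int, d ≤ e → e * e ≤ i → ¬ e ∣ i) := by
  intro d
  induction d using answerTrial.induct (i := i) with
  | case1 d hdd hmod =>
    intro hd2
    rw [answerTrial]
    simp only [hdd, if_true, hmod, if_pos rfl]
    constructor
    · intro h; exact absurd h (by simp)
    · intro hall
      exact absurd ((PySem.Int.mod_eq_zero_iff_dvd i d).mp hmod) (hall d le_rfl hdd)
  | case2 d hdd hmod ih =>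
    intro hd2
    rw [answerTrial]
    simp only [hdd, if_true, if_neg hmod]
    rw [ih (by omega)]
    constructor
    · intro hall e hde hee
      rcases eq_or_lt_of_le hde with h | h
      · subst h
        intro hdvd
        exact hmod ((PySem.Int.mod_eq_zero_iff_dvd i d).mpr hdvd)
      · exact hall e (by omega) hee
    · intro hall e hde hee
      exact hall e (by omega) hee
  | case3 d hdd =>
    intro hd2
    rw [answerTrial]
    simp only [hdd, if_false]
    constructor
    · intro _ e hde hee
      have : d * d ≤ e * e := by nlinarith
      exact absurd (by omega : d * d ≤ i) hdd
    · intro _; trivial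

lemma answerTrial_prime (k : Nat) (h2 : 2 ≤ k) :
    answerTrial (k : Int) 2 = decide (Nat.Prime k) := by
  by_cases hp : Nat.Prime k
  · simp only [hp, decide_true]
    rw [answerTrial_iff (k : Int) 2 le_rfl]
    intro e he2 hee hdvd
    have he0 : 0 ≤ e := by omega
    have hcast : e = ((e.toNat : Nat) : Int) := by omega
    have hdvdn : e.toNat ∣ k := by
      rw [hcast] at hdvd
      exact_mod_cast hdvd
    rcases hp.eq_one_or_self_of_dvd e.toNat hdvdn with h | h
    · omega
    · rw [hcast, h] at hee
      have : (k : Int) * k ≤ k := by exact_mod_cast hee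
      nlinarith [show (2:Int) ≤ (k:Int) from by exact_mod_cast h2]
  · simp only [hp, decide_false]
    by_contra htrue
    have htrue' : answerTrial (k : Int) 2 = true := by
      cases h : answerTrial (k : Int) 2
      · exact absurd h htrue
      · rfl
    have hall := (answerTrial_iff (k : Int) 2 le_rfl).mp htrue'
    apply hp
    rw [Nat.prime_def_le_sqrt]
    refine ⟨h2, fun m hm2 hmsqrt hdvd => ?_⟩
    have hmm : m * m ≤ k := Nat.le_sqrt.mp hmsqrt
    exact hall (m : Int) (by exact_mod_cast hm2) (by exact_mod_cast hmm)
      (by exact_mod_cast hdvd)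

lemma prime_str_eq :
    answerPrimeStr =
      PySem.Str.join ""
        ((PySem.List.pyRange 2 20220 1).foldl
          (fun parts i => if answerTrial i 2 then parts ++ [PySem.Int.toStr i] else parts) []) := by
  unfold answerPrimeStr
  rw [PySem.List.foldl_append_if (fun i => answerTrial i 2) PySem.Int.toStr _ [], List.nil_append]
  refine congrArg (PySem.Str.join "") ?_
  rw [PySem.List.pyRange_one_cons (by norm_num : (1:Int) < 20220), List.filter_cons]
  have h1 : PySem.List.pyGetD answerTable 1 false = false := by
    cases h : PySem.List.pyGetD answerTable 1 false
    · rfl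
    · exact absurd ((answerTable_eq 1 (by norm_num) (by norm_num)).mp h)
        (by norm_num [Nat.not_prime_one])
  simp only [h1, Bool.false_eq_true, if_false]
  refine congrArg (List.map PySem.Int.toStr) ?_
  refine List.filter_congr fun i hi => ?_
  rw [PySem.List.mem_pyRange_one] at hi
  have hcast : ((i.toNat : Nat) : Int) = i := by omega
  have hB := answerTrial_prime i.toNat (by omega)
  rw [hcast] at hB
  rw [hB]
  by_cases hp : Nat.Prime i.toNat
  · rw [(answerTable_eq i (by omega) (by omega)).mpr hp]
    simp [hp]
  · have hfalse : PySem.List.pyGetD answerTable i false = false := by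
      cases h : PySem.List.pyGetD answerTable i false
      · rfl
      · exact absurd ((answerTable_eq i (by omega) (by omega)).mp h) hp
    rw [hfalse]
    simp [hp]

-- ===== VERDICT (by name: the statement is the Claim_ definition above) =====
theorem answer_spec : Claim_equal_answer := by
  intro n _
  unfold Spec_answer answer answer_alt
  rw [prime_str_eq]
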